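-- pv_equiv track=rewrite | github.com/tanmaik/AI | Unit 1/Sliding Puzzles/Green1_SlidingPuzzles.py | find_goal
-- ===== SOURCE A (Python) =====
-- import math
--
-- def find_goal(puzzle):
--     goal_puzzle = ""
--     puzzle = puzzle[2:]
--     for char in puzzle:
--         if char.isalpha() or char.isdigit():
--             goal_puzzle += char
--     goal_puzzle = ''.join(sorted(goal_puzzle))
--     goal_puzzle += '.'
--     length = str(int(math.sqrt((len(goal_puzzle)))))
--     goal_puzzle = length + " " + goal_puzzle
--     return goal_puzzle
-- ===== SOURCE B (Python) =====
-- import math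
--
-- def find_goal(puzzle):
--     counts = {}
--     for char in puzzle[2:]:
--         if char.isalpha() or char.isdigit():
--             counts[char] = counts.get(char, 0) + 1
--     core = ''.join(c * counts[c] for c in sorted(counts)) + '.'
--     return str(int(math.sqrt(len(core)))) + ' ' + core
-- ===== Notes on version B (the rewrite author's own statement) =====
-- stated objective: alternative
-- what changed: Replaces A's character-by-character string accumulation followed by a comparison sort of all kept characters with a single-pass frequency dict over puzzle[2:] whose distinct keys are sorted once and expanded by their counts.
import Mathlib
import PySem

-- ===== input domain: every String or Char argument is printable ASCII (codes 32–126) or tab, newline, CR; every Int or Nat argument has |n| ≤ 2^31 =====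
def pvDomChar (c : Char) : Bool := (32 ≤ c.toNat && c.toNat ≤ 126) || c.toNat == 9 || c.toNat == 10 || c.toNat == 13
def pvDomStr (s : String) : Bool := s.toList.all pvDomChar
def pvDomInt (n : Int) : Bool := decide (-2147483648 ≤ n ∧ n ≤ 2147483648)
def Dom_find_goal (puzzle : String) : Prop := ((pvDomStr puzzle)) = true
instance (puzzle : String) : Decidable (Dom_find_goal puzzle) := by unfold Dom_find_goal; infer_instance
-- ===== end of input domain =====

-- B replaces A's build-then-comparison-sort with a frequency dict over puzzle[2:] whose distinct keys are
-- sorted once and expanded by count (alternative decomposition of the same glue code).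
-- int(math.sqrt(n)) is ported as Nat.sqrt n, exact for the lengths these strings can have.

-- ===== PORT A =====
def find_goal (puzzle : String) : String :=
  let p := PySem.List.slice puzzle.toList (some 2) none
  let gp := p.foldl (fun acc c => if PySem.Chars.isalpha c || PySem.Chars.isdigit c then acc ++ [c] else acc) ([] : List Char)
  let gp := PySem.List.sorted gp (fun c => c)
  let gp := gp ++ ['.']
  let length := PySem.Int.toChars ((Nat.sqrt gp.length : Nat) : Int)
  String.ofList (length ++ [' '] ++ gp)

-- ===== PORT B =====
def find_goal_alt (puzzle : String) : String :=
  let counts := (PySem.List.slice puzzle.toList (some 2) none).foldl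
    (fun d c => if PySem.Chars.isalpha c || PySem.Chars.isdigit c then d.insert c (d.getD c 0 + 1) else d)
    (PySem.Dict.empty : PySem.Dict Char Int)
  let core := (PySem.List.sorted counts.keys (fun c => c)).foldl
    (fun acc c => acc ++ List.replicate (counts.getD c 0).toNat c) ([] : List Char) ++ ['.']
  String.ofList (PySem.Int.toChars ((Nat.sqrt core.length : Nat) : Int) ++ [' '] ++ core)

-- ===== PRECONDITION & SPEC =====
def Spec_find_goal (puzzle : String) (out : String) : Prop := out = find_goal_alt puzzle
instance (puzzle : String) (out : String) : Decidable (Spec_find_goal puzzle out) := by unfold Spec_find_goal; infer_instance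

-- ===== CLAIM (what is proved, stated in full; the proofs are below) =====
def Claim_equal_find_goal : Prop := ∀ (puzzle : String), Dom_find_goal puzzle → Spec_find_goal puzzle (find_goal puzzle)

-- ===== LEMMAS AND PROOFS =====

-- a foldl that skips elements failing p is the foldl of the filtered list
theorem foldl_if_filter {α β : Type} (p : α → Bool) (g : β → α → β) (l : List α) (d0 : β) :
    l.foldl (fun d c => if p c then g d c else d) d0 = (l.filter p).foldl g d0 := by
  induction l generalizing d0 with
  | nil => rfl
  | cons c t ih =>
    by_cases h : p c <;> simp [h, ih]

theorem count_flatMap_replicate (f ks : List Char) (hnd : ks.Nodup) (x : Char) :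
    (ks.flatMap (fun c => List.replicate (f.count c) c)).count x
      = if x ∈ ks then f.count x else 0 := by
  induction ks with
  | nil => simp
  | cons c t ih =>
    rcases List.nodup_cons.mp hnd with ⟨hc, ht⟩
    simp only [List.flatMap_cons, List.count_append, ih ht]
    by_cases hx : x = c
    · subst hx; simp [hc]
    · have hcx : ¬ c = x := fun h => hx h.symm
      simp [List.count_replicate, hcx, hx, List.mem_cons]

theorem pairwise_flatMap_replicate (f ks : List Char) (h : ks.Pairwise (· < ·)) :
    (ks.flatMap (fun c => List.replicate (f.count c) c)).Pairwise (· ≤ ·) := by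
  induction ks with
  | nil => simp
  | cons c t ih =>
    rcases List.pairwise_cons.mp h with ⟨hc, ht⟩
    simp only [List.flatMap_cons]
    rw [List.pairwise_append]
    refine ⟨List.pairwise_replicate.mpr (Or.inr le_rfl), ih ht, ?_⟩
    intro a ha b hb
    rcases List.mem_flatMap.mp hb with ⟨c', hc', hb'⟩
    rw [List.eq_of_mem_replicate ha, List.eq_of_mem_replicate hb']
    exact le_of_lt (hc c' hc')

-- the counting-sort reconstruction IS sorted(f)
theorem sorted_eq_flatMap_replicate (f : List Char) :
    PySem.List.sorted f (fun c => c)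
      = (PySem.List.sorted (PySem.Set.ofList f) (fun c => c)).flatMap
          (fun c => List.replicate (f.count c) c) := by
  set ks := PySem.List.sorted (PySem.Set.ofList f) (fun c => c) with hks
  have hlt : ks.Pairwise (· < ·) := PySem.List.sorted_ofList_pairwise_lt f
  have hnd : ks.Nodup := hlt.imp (fun h => ne_of_lt h)
  apply PySem.List.sorted_id_eq_of_perm_of_pairwise
  · rw [List.perm_iff_count]
    intro x
    rw [count_flatMap_replicate f ks hnd x]
    by_cases hx : x ∈ f
    · have : x ∈ ks := by
        rw [hks, PySem.List.mem_sorted]; exact (PySem.Set.mem_ofList f x).mpr hx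
      simp [this]
    · have : x ∉ ks := by
        rw [hks, PySem.List.mem_sorted]
        exact fun h => hx ((PySem.Set.mem_ofList f x).mp h)
      simp [this, List.count_eq_zero_of_not_mem hx]
  · exact pairwise_flatMap_replicate f ks hlt

-- ===== VERDICT (by name: the statement is the Claim_ definition above) =====
theorem find_goal_spec : Claim_equal_find_goal := by
  intro puzzle _
  unfold Spec_find_goal find_goal find_goal_alt
  set p := PySem.List.slice puzzle.toList (some 2) none with hp
  have hA : p.foldl
      (fun acc c => if PySem.Chars.isalpha c || PySem.Chars.isdigit c then acc ++ [c] else acc)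
      ([] : List Char)
      = p.filter (fun c => PySem.Chars.isalpha c || PySem.Chars.isdigit c) := by
    simpa using
      PySem.List.foldl_append_if (fun c => PySem.Chars.isalpha c || PySem.Chars.isdigit c) id p []
  have hB : p.foldl
      (fun d c => if PySem.Chars.isalpha c || PySem.Chars.isdigit c then d.insert c (d.getD c 0 + 1) else d)
      (PySem.Dict.empty : PySem.Dict Char Int)
      = PySem.Dict.counter (p.filter (fun c => PySem.Chars.isalpha c || PySem.Chars.isdigit c)) := by
    rw [foldl_if_filter]
    exact PySem.Dict.foldl_insert_getD_add_one_eq_counter _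
  have hcore : ∀ f : List Char,
      (PySem.List.sorted (PySem.Dict.counter f).keys (fun c => c)).foldl
        (fun acc c => acc ++ List.replicate ((PySem.Dict.counter f).getD c 0).toNat c)
        ([] : List Char)
      = PySem.List.sorted f (fun c => c) := by
    intro f
    rw [PySem.Dict.keys_counter]
    simp only [PySem.Dict.getD_counter, Int.toNat_natCast]
    rw [PySem.List.foldl_append_eq_flatMap]
    simp [← sorted_eq_flatMap_replicate]
  simp only [hA, hB, hcore]
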